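-- pv_equiv track=rewrite | github.com/kelpasa/Code_Wars_Python | 6 кю/Hollow array.py | is_hollow
-- ===== SOURCE A (Python) =====
-- def is_hollow(x):
--     if len(x)<3:
--         return False
--     z = 0
--     for i,(a,b) in enumerate(zip(x,x[::-1])):
--         if i>len(x)//2:
--             return z>=2
--         if (a==0) != (b==0):
--             return False
--         if a!=0 and z>0:
--             return False
--         if a==0:
--             z += 1
--         elif z>0:
--             return False
-- ===== SOURCE B (Python) =====
-- def is_hollow(x):
--     # Strip-the-ends view: hollow iff the first-zero offsets from both ends agree,
--     # the zero block is wide enough, and everything between the ends' nonzero rims is zero.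
--     n = len(x)
--     a = next((i for i, v in enumerate(x) if v == 0), n)
--     b = next((i for i, v in enumerate(reversed(x)) if v == 0), n)
--     return n >= 3 and a == b and a <= n // 2 - 1 and all(v == 0 for v in x[a:n - b])
-- ===== Notes on version B (the rewrite author's own statement) =====
-- stated objective: simpler
-- what changed: A pairs each element with its mirror via zip(x, x[::-1]) and walks half the list with a zero-counter state machine; B instead measures the nonzero rim from each end (first zero index from the front and from the back), requires the two rims to be equal and short enough (first zero at index <= len(x)//2 - 1), and checks that everything between the rims is zero.
import Mathlib
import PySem

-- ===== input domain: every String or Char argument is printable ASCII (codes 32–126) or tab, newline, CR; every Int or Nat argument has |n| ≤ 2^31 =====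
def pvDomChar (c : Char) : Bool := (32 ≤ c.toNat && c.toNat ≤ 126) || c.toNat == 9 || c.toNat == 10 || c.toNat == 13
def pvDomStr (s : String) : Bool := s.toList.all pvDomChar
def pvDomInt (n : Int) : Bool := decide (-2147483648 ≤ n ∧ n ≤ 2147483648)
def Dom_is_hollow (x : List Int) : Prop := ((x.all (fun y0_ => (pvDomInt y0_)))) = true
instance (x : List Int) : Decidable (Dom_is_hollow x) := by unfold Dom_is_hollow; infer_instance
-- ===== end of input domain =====

-- B strips the nonzero rims from both ends instead of A's paired front/back scan; objective: simpler.

-- ===== PORT A =====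
-- the for-loop over enumerate(zip(x, x[::-1])) with accumulators i, z; [] case = loop exhausted
-- (Python would fall through returning None; unreachable when len(x) ≥ 3, which is the only way the loop is entered)
def isHollowGo (half : Nat) : List (Int × Int) → Nat → Nat → Bool
  | [], _, _ => false
  | (a, b) :: rest, i, z =>
    if half < i then decide (2 ≤ z)
    else if (a == 0) != (b == 0) then false
    else if a != 0 && decide (0 < z) then false
    else if a == 0 then isHollowGo half rest (i + 1) (z + 1)
    else if 0 < z then false
    else isHollowGo half rest (i + 1) z

def is_hollow (x : List Int) : Bool :=
  -- x[::-1] is x.reverse (PySem.List.slice?_none_none_neg_one)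
  if x.length < 3 then false
  else isHollowGo (x.length / 2) (x.zip x.reverse) 0 0

-- ===== PORT B =====
def is_hollow_alt (x : List Int) : Bool :=
  let n := x.length
  -- next((i for i, v in enumerate(x) if v == 0), n) is findIdx (length when absent)
  let a := x.findIdx (fun v => v == 0)
  -- same generator over reversed(x)
  let b := x.reverse.findIdx (fun v => v == 0)
  decide (3 ≤ n) && (a == b) && decide ((a : Int) ≤ PySem.Int.floordiv (n : Int) 2 - 1)
    && (PySem.List.slice x (some (a : Int)) (some ((n : Int) - (b : Int)))).all (fun v => v == 0)

-- ===== PRECONDITION & SPEC =====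
def Spec_is_hollow (x : List Int) (out : Bool) : Prop := out = is_hollow_alt x
instance (x : List Int) (out : Bool) : Decidable (Spec_is_hollow x out) := by unfold Spec_is_hollow; infer_instance

-- ===== CLAIM (what is proved, stated in full; the proofs are below) =====
def Claim_equal_is_hollow : Prop := ∀ (x : List Int), Dom_is_hollow x → Spec_is_hollow x (is_hollow x)

-- ===== LEMMAS AND PROOFS =====

-- x.getD j 1: the j-th entry, any nonzero default out of range (only used for j < x.length)
def gI (x : List Int) (j : Nat) : Int := x.getD j 1

-- the three conditions A's loop, started at index i with counter z, still has to check: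
-- zero/nonzero symmetry on the remaining first half, no nonzero after a zero, final count ≥ 2
def wSym (x : List Int) (i : Nat) : Bool :=
  (List.range' i (x.length / 2 + 1 - i)).all
    (fun j => (gI x j == 0) == (gI x (x.length - 1 - j) == 0))
def wChain (x : List Int) (i z : Nat) : Bool :=
  (List.range' i (x.length / 2 + 1 - i)).all
    (fun j => (gI x j == 0) || (decide (z = 0) && (List.range' i (j - i)).all (fun k => gI x k != 0)))
def wCnt (x : List Int) (i z : Nat) : Bool :=
  decide (2 ≤ z + (List.range' i (x.length / 2 + 1 - i)).countP (fun j => gI x j == 0))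

lemma gI_eq (x : List Int) (j : Nat) (hj : j < x.length) : gI x j = x[j] :=
  List.getD_eq_getElem x 1 hj

lemma pairs_drop (x : List Int) (i : Nat) (hi : i ≤ x.length) :
    (x.zip x.reverse).drop i
      = (List.range' i (x.length - i)).map (fun j => (gI x j, gI x (x.length - 1 - j))) := by
  apply List.ext_getElem
  · simp
  · intro t h1 h2
    have hlt : i + t < x.length := by simp at h1; omega
    simp only [List.getElem_drop, List.getElem_map, List.getElem_range', List.getElem_zip,
      List.getElem_reverse, gI, one_mul]
    rw [List.getD_eq_getElem _ _ hlt, List.getD_eq_getElem _ _ (by omega)]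

lemma wSym_cons (x : List Int) (i : Nat) (hi : i ≤ x.length / 2) :
    wSym x i = (((gI x i == 0) == (gI x (x.length - 1 - i) == 0)) && wSym x (i + 1)) := by
  have h : x.length / 2 + 1 - i = (x.length / 2 + 1 - (i+1)) + 1 := by omega
  simp only [wSym, h, List.range'_succ, List.all_cons]

lemma wCnt_zero (x : List Int) (i z : Nat) (hi : i ≤ x.length / 2) (hA : gI x i = 0) :
    wCnt x i z = wCnt x (i + 1) (z + 1) := by
  have h : x.length / 2 + 1 - i = (x.length / 2 + 1 - (i+1)) + 1 := by omega
  simp only [wCnt, h, List.range'_succ, List.countP_cons]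
  simp [hA]
  constructor <;> omega

lemma wCnt_pos (x : List Int) (i z : Nat) (hi : i ≤ x.length / 2) (hA : gI x i ≠ 0) :
    wCnt x i z = wCnt x (i + 1) z := by
  have h : x.length / 2 + 1 - i = (x.length / 2 + 1 - (i+1)) + 1 := by omega
  simp only [wCnt, h, List.range'_succ, List.countP_cons]
  simp [hA]

lemma wChain_zero (x : List Int) (i z : Nat) (hi : i ≤ x.length / 2) (hA : gI x i = 0) :
    wChain x i z = wChain x (i + 1) (z + 1) := by
  rw [Bool.eq_iff_iff]
  simp only [wChain, List.all_eq_true, List.mem_range'_1, Bool.or_eq_true, Bool.and_eq_true,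
    beq_iff_eq, bne_iff_ne, decide_eq_true_eq]
  constructor
  · intro H j hj
    rcases H j (by omega) with h | h
    · exact Or.inl h
    · exact absurd (h.2 i ⟨by omega, by omega⟩) (by simp [hA])
  · intro H j hj
    by_cases hji : j = i
    · subst hji; exact Or.inl hA
    · rcases H j ⟨by omega, by omega⟩ with h | h
      · exact Or.inl h
      · exact absurd (h.2 i ⟨by omega, by omega⟩) (by simp [hA])

lemma wChain_pos_zero (x : List Int) (i : Nat) (hi : i ≤ x.length / 2) (hA : gI x i ≠ 0) :
    wChain x i 0 = wChain x (i + 1) 0 := by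
  rw [Bool.eq_iff_iff]
  simp only [wChain, List.all_eq_true, List.mem_range'_1, Bool.or_eq_true, Bool.and_eq_true,
    beq_iff_eq, bne_iff_ne, decide_eq_true_eq]
  constructor
  · intro H j hj
    rcases H j (by omega) with h | h
    · exact Or.inl h
    · exact Or.inr ⟨trivial, fun k hk => h.2 k ⟨by omega, by omega⟩⟩
  · intro H j hj
    by_cases hji : j = i
    · subst hji
      exact Or.inr ⟨trivial, fun k hk => by omega⟩
    · rcases H j ⟨by omega, by omega⟩ with h | h
      · exact Or.inl h
      · refine Or.inr ⟨trivial, fun k hk => ?_⟩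
        by_cases hki : k = i
        · subst hki; exact hA
        · exact h.2 k ⟨by omega, by omega⟩

lemma wChain_pos_posz (x : List Int) (i z : Nat) (hi : i ≤ x.length / 2) (hA : gI x i ≠ 0)
    (hz : 0 < z) : wChain x i z = false := by
  have h : x.length / 2 + 1 - i = (x.length / 2 + 1 - (i+1)) + 1 := by omega
  simp only [wChain, h, List.range'_succ, List.all_cons]
  have hz' : ¬ (z = 0) := by omega
  simp [hA, hz']

lemma loop_eq (x : List Int) (hn : 3 ≤ x.length) :
    ∀ m i z, i ≤ x.length / 2 + 1 → x.length / 2 + 1 - i = m →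
      isHollowGo (x.length / 2) ((x.zip x.reverse).drop i) i z
        = (wSym x i && wChain x i z && wCnt x i z) := by
  intro m
  induction m with
  | zero =>
    intro i z hi hm
    have hie : i = x.length / 2 + 1 := by omega
    rw [pairs_drop x i (by omega)]
    have hr : x.length - i = (x.length - i - 1) + 1 := by omega
    rw [hr, List.range'_succ, List.map_cons]
    have h0 : x.length / 2 + 1 - i = 0 := by omega
    simp only [isHollowGo, wSym, wChain, wCnt, h0, List.range'_zero, List.all_nil]
    rw [if_pos (by omega)]
    simp
  | succ m ih =>
    intro i z hi hm
    have hih : i ≤ x.length / 2 := by omega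
    rw [pairs_drop x i (by omega)]
    have hr : x.length - i = (x.length - (i+1)) + 1 := by omega
    rw [hr, List.range'_succ, List.map_cons, ← pairs_drop x (i+1) (by omega)]
    simp only [isHollowGo]
    rw [if_neg (by omega)]
    by_cases hA : gI x i = 0 <;> by_cases hB : gI x (x.length - 1 - i) = 0
    · -- both zero: recurse with z+1
      rw [if_neg (by simp [hA, hB]), if_neg (by simp [hA]), if_pos (by simp [hA])]
      rw [ih (i+1) (z+1) (by omega) (by omega)]
      rw [wSym_cons x i hih, wChain_zero x i z hih hA, wCnt_zero x i z hih hA]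
      simp [hA, hB]
    · rw [if_pos (by simp [hA, hB])]
      rw [wSym_cons x i hih]
      simp [hA, hB]
    · rw [if_pos (by simp [hA, hB])]
      rw [wSym_cons x i hih]
      simp [hA, hB]
    · rw [if_neg (by simp [hA, hB])]
      by_cases hz : z = 0
      · subst hz
        rw [if_neg (by simp), if_neg (by simp [hA]), if_neg (by omega)]
        rw [ih (i+1) 0 (by omega) (by omega)]
        rw [wSym_cons x i hih, wChain_pos_zero x i hih hA, wCnt_pos x i 0 hih hA]
        have e1 : (gI x i == 0) = false := beq_eq_false_iff_ne.mpr hA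
        have e2 : (gI x (x.length - 1 - i) == 0) = false := beq_eq_false_iff_ne.mpr hB
        simp [e1, e2]
      · rw [if_pos (by simp [hA]; omega)]
        rw [wChain_pos_posz x i z hih hA (by omega)]
        simp

lemma cnt_formula (x : List Int) (a : Nat) (ha : a ≤ x.length / 2 + 1)
    (hp : ∀ j, j < x.length / 2 + 1 → ((gI x j = 0) ↔ a ≤ j)) :
    (List.range' 0 (x.length / 2 + 1)).countP (fun j => gI x j == 0) = x.length / 2 + 1 - a := by
  have h2 : a + (x.length / 2 + 1 - a) = x.length / 2 + 1 := by omega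
  have hsplit : List.range' 0 (x.length / 2 + 1)
      = List.range' 0 a ++ List.range' a (x.length / 2 + 1 - a) := by
    rw [← h2, ← List.range'_append]
    norm_num
  rw [hsplit, List.countP_append]
  have c1 : (List.range' 0 a).countP (fun j => gI x j == 0) = 0 := by
    refine List.countP_eq_zero.mpr ?_
    intro j hj
    simp only [List.mem_range'_1] at hj
    simp only [beq_iff_eq]
    intro h
    have := (hp j (by omega)).mp h
    omega
  have c2 : (List.range' a (x.length / 2 + 1 - a)).countP (fun j => gI x j == 0)
      = (List.range' a (x.length / 2 + 1 - a)).length := by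
    refine List.countP_eq_length.mpr ?_
    intro j hj
    simp only [List.mem_range'_1] at hj
    simp only [beq_iff_eq]
    exact (hp j (by omega)).mpr (by omega)
  rw [c1, c2, List.length_range']
  omega

lemma alt_form (x : List Int) (hn : 3 ≤ x.length) :
    is_hollow_alt x
      = ((x.findIdx (fun v => v == 0) == x.reverse.findIdx (fun v => v == 0))
         && decide (x.findIdx (fun v => v == 0) + 1 ≤ x.length / 2)
         && ((x.drop (x.findIdx (fun v => v == 0))).take
               (x.length - x.reverse.findIdx (fun v => v == 0) - x.findIdx (fun v => v == 0))).all
              (fun v => v == 0)) := by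
  have hbn : x.reverse.findIdx (fun v => v == 0) ≤ x.length := by
    simpa using List.findIdx_le_length (p := fun v => v == 0) (xs := x.reverse)
  have hfd : PySem.Int.floordiv ((x.length : Nat) : Int) 2 = ((x.length / 2 : Nat) : Int) := by
    exact_mod_cast PySem.Int.floordiv_natCast x.length 2
  have hsub : ((x.length : Nat) : Int) - ((x.reverse.findIdx (fun v => v == 0) : Nat) : Int)
      = (((x.length - x.reverse.findIdx (fun v => v == 0) : Nat)) : Int) := by
    push_cast [Nat.cast_sub hbn]; ring
  have hdec : ∀ aa : Nat, (decide ((aa : Int) ≤ ((x.length / 2 : Nat) : Int) - 1))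
      = decide (aa + 1 ≤ x.length / 2) := by
    intro aa; rw [decide_eq_decide]; omega
  simp only [is_hollow_alt, hfd, hsub, PySem.List.slice_natCast, hdec]
  simp [hn]

lemma wSym_iff (x : List Int) :
    wSym x 0 = true ↔ ∀ j, j < x.length / 2 + 1 → ((gI x j = 0) ↔ (gI x (x.length - 1 - j) = 0)) := by
  simp only [wSym, List.all_eq_true, List.mem_range'_1, Nat.sub_zero, beq_iff_eq]
  constructor
  · intro H j hj
    have := H j ⟨by omega, by omega⟩
    constructor <;> intro h <;> simp [h] at this <;> simpa using this
  · intro H j hj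
    have := H j (by omega)
    by_cases h : gI x j = 0
    · simp [h, this.mp h]
    · have h2 : ¬ gI x (x.length - 1 - j) = 0 := fun hh => h (this.mpr hh)
      simp [h, h2]

lemma wChain_iff (x : List Int) :
    wChain x 0 0 = true ↔ ∀ j, j < x.length / 2 + 1 → (gI x j = 0 ∨ ∀ k, k < j → gI x k ≠ 0) := by
  simp only [wChain, List.all_eq_true, List.mem_range'_1, Nat.sub_zero, Bool.or_eq_true,
    beq_iff_eq, Bool.and_eq_true, decide_eq_true_eq, bne_iff_ne]
  constructor
  · intro H j hj
    rcases H j ⟨by omega, by omega⟩ with h | h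
    · exact Or.inl h
    · exact Or.inr (fun k hk => h.2 k ⟨by omega, by omega⟩)
  · intro H j hj
    rcases H j (by omega) with h | h
    · exact Or.inl h
    · exact Or.inr ⟨trivial, fun k hk => h k (by omega)⟩

lemma wCnt_iff (x : List Int) :
    wCnt x 0 0 = true ↔ 2 ≤ (List.range' 0 (x.length / 2 + 1)).countP (fun j => gI x j == 0) := by
  simp [wCnt]

lemma fa_lt (x : List Int) {j : Nat} (hj : j < x.length)
    (h : j < x.findIdx (fun v => v == 0)) : x[j] ≠ 0 := by
  have := List.not_of_lt_findIdx h
  simpa using this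

lemma fa_min (x : List Int) {j : Nat} (hj : j < x.length) (h : x[j] = 0) :
    x.findIdx (fun v => v == 0) ≤ j := by
  by_contra hc
  exact fa_lt x hj (by omega) h

lemma bridge (x : List Int) (hn : 3 ≤ x.length) :
    (wSym x 0 && wChain x 0 0 && wCnt x 0 0) = is_hollow_alt x := by
  rw [alt_form x hn, Bool.eq_iff_iff]
  simp only [Bool.and_eq_true, wSym_iff, wChain_iff, wCnt_iff, beq_iff_eq, decide_eq_true_eq,
    List.all_eq_true]
  constructor
  · rintro ⟨⟨hS, hC⟩, hF⟩
    have ha_le : x.findIdx (fun v => v == 0) ≤ x.length / 2 := by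
      by_contra hc
      have h0 : (List.range' 0 (x.length / 2 + 1)).countP (fun j => gI x j == 0) = 0 := by
        refine List.countP_eq_zero.mpr ?_
        intro j hj
        simp only [List.mem_range'_1] at hj
        have hjn : j < x.length := by omega
        simp only [beq_iff_eq]
        rw [gI_eq x j hjn]
        exact fa_lt x hjn (by omega)
      omega
    have haN : x.findIdx (fun v => v == 0) < x.length := by omega
    have ha0 : gI x (x.findIdx (fun v => v == 0)) = 0 := by
      rw [gI_eq _ _ haN]
      simpa using List.findIdx_getElem (w := haN)
    have hwin : ∀ j, x.findIdx (fun v => v == 0) ≤ j → j < x.length / 2 + 1 → gI x j = 0 := by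
      intro j h1 h2
      rcases hC j h2 with h | h
      · exact h
      · rcases Nat.eq_or_lt_of_le h1 with he | hlt
        · rw [← he]; exact ha0
        · exact absurd ha0 (h _ hlt)
    have hp : ∀ j, j < x.length / 2 + 1 → (gI x j = 0 ↔ x.findIdx (fun v => v == 0) ≤ j) := by
      intro j hj
      refine ⟨fun hz => ?_, fun h1 => hwin j h1 hj⟩
      have hjn : j < x.length := by omega
      rw [gI_eq x j hjn] at hz
      exact fa_min x hjn hz
    have hcnt := cnt_formula x (x.findIdx (fun v => v == 0)) (by omega) hp
    have ha1 : x.findIdx (fun v => v == 0) + 1 ≤ x.length / 2 := by omega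
    have hSfull : ∀ j, j < x.length → (gI x j = 0 ↔ gI x (x.length - 1 - j) = 0) := by
      intro j hj
      by_cases hjh : j < x.length / 2 + 1
      · exact hS j hjh
      · have h2 : x.length - 1 - j < x.length / 2 + 1 := by omega
        have := hS (x.length - 1 - j) h2
        have h3 : x.length - 1 - (x.length - 1 - j) = j := by omega
        rw [h3] at this
        exact this.symm
    have hzi : ∀ j, j < x.length →
        (gI x j = 0 ↔ (x.findIdx (fun v => v == 0) ≤ j ∧ j ≤ x.length - 1 - x.findIdx (fun v => v == 0))) := by
      intro j hj
      by_cases hjh : j < x.length / 2 + 1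
      · rw [hp j hjh]
        exact ⟨fun h1 => ⟨h1, by omega⟩, fun h => h.1⟩
      · rw [hSfull j hj, hp (x.length - 1 - j) (by omega)]
        constructor
        · intro h1; exact ⟨by omega, by omega⟩
        · intro h1; omega
    have hb : x.reverse.findIdx (fun v => v == 0) = x.findIdx (fun v => v == 0) := by
      refine (List.findIdx_eq (xs := x.reverse) (i := x.findIdx (fun v => v == 0))
        (by simpa using haN)).mpr ⟨?_, ?_⟩
      · simp only [List.getElem_reverse, beq_iff_eq]
        rw [← gI_eq]
        exact (hzi _ (by omega)).mpr ⟨by omega, by omega⟩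
      · intro k hk
        simp only [List.getElem_reverse]
        rw [beq_eq_false_iff_ne]
        rw [← gI_eq _ _ (by omega)]
        intro hzz
        have := (hzi _ (by omega)).mp hzz
        omega
    refine ⟨⟨hb.symm, ha1⟩, ?_⟩
    intro v hv
    rw [List.mem_iff_getElem] at hv
    obtain ⟨t, ht, rfl⟩ := hv
    have ht' : t < x.length - 2 * x.findIdx (fun v => v == 0) := by
      simp [List.length_take, List.length_drop, hb] at ht
      omega
    simp only [List.getElem_take, List.getElem_drop]
    rw [← gI_eq _ _ (by omega)]
    exact (hzi _ (by omega)).mpr ⟨by omega, by omega⟩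
  · rintro ⟨⟨hab, ha1⟩, hall⟩
    have haN : x.findIdx (fun v => v == 0) < x.length := by omega
    have hzi : ∀ j, j < x.length →
        (gI x j = 0 ↔ (x.findIdx (fun v => v == 0) ≤ j ∧ j ≤ x.length - 1 - x.findIdx (fun v => v == 0))) := by
      intro j hj
      constructor
      · intro hz
        rw [gI_eq x j hj] at hz
        have h1 : x.findIdx (fun v => v == 0) ≤ j := fa_min x hj hz
        refine ⟨h1, ?_⟩
        by_contra hc
        have hk : x.length - 1 - j < x.reverse.findIdx (fun v => v == 0) := by
          rw [← hab]; omega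
        have h4 := List.not_of_lt_findIdx hk
        simp only [List.getElem_reverse] at h4
        have h3 : x.length - 1 - (x.length - 1 - j) = j := by omega
        have h6 : gI x (x.length - 1 - (x.length - 1 - j)) ≠ 0 := by
          rw [gI_eq _ _ (by omega)]
          simpa using h4
        rw [h3] at h6
        exact h6 (by rw [gI_eq x j hj]; exact hz)
      · rintro ⟨h1, h2⟩
        have ht : j - x.findIdx (fun v => v == 0) <
            ((x.drop (x.findIdx (fun v => v == 0))).take
              (x.length - x.reverse.findIdx (fun v => v == 0) - x.findIdx (fun v => v == 0))).length := by
          simp [List.length_take, List.length_drop, ← hab]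
          omega
        have h5 := hall _ (List.getElem_mem ht)
        simp only [List.getElem_take, List.getElem_drop] at h5
        have haj : x.findIdx (fun v => v == 0) + (j - x.findIdx (fun v => v == 0)) = j := by omega
        rw [← haj]
        rw [gI_eq _ _ (by omega)]
        exact h5
    refine ⟨⟨?_, ?_⟩, ?_⟩
    · intro j hj
      rw [hzi j (by omega), hzi (x.length - 1 - j) (by omega)]
      omega
    · intro j hj
      by_cases hz : gI x j = 0
      · exact Or.inl hz
      · refine Or.inr (fun k hk hzz => ?_)
        have hja : ¬(x.findIdx (fun v => v == 0) ≤ j ∧ j ≤ x.length - 1 - x.findIdx (fun v => v == 0)) :=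
          fun h => hz ((hzi j (by omega)).mpr h)
        have hk2 := (hzi k (by omega)).mp hzz
        omega
    · have hp : ∀ j, j < x.length / 2 + 1 → (gI x j = 0 ↔ x.findIdx (fun v => v == 0) ≤ j) := by
        intro j hj
        rw [hzi j (by omega)]
        exact ⟨And.left, fun h => ⟨h, by omega⟩⟩
      rw [cnt_formula x (x.findIdx (fun v => v == 0)) (by omega) hp]
      omega

-- ===== VERDICT (by name: the statement is the Claim_ definition above) =====
theorem is_hollow_spec : Claim_equal_is_hollow := by
  intro x _
  unfold Spec_is_hollow
  by_cases hn : 3 ≤ x.length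
  · have h0 := loop_eq x hn (x.length / 2 + 1) 0 0 (by omega) rfl
    simp only [List.drop_zero] at h0
    rw [is_hollow, if_neg (by omega), h0, bridge x hn]
  · simp [is_hollow, is_hollow_alt, Nat.lt_of_not_le hn, hn]
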